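-- pv_equiv track=rewrite | github.com/tnelsonw/WordleSuggestor | main.py | suggest_word
-- ===== SOURCE A (Python) =====
-- def suggest_word(find, confirmed, remove, remaining_dict):
--
--     if "" in remaining_dict:
--         remaining_dict.remove("")
--
--     for position, letter in confirmed.items():
--         for guess in remaining_dict.copy():
--             if guess.find(letter, position) != position:
--                 remaining_dict.remove(guess)
--
--     for position, letter in find.items():
--         for guess in remaining_dict.copy():
--             if guess.find(letter, position) == position:
--                 remaining_dict.remove(guess)
--             elif letter not in guess:
--                 remaining_dict.remove(guess)
--
--     for position, letter in remove.items():
--         for guess in remaining_dict.copy():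
--             if letter in guess and letter not in confirmed.values() and letter not in find.values():
--                 remaining_dict.remove(guess)
--
--     return remaining_dict
-- ===== SOURCE B (Python) =====
-- def suggest_word(find, confirmed, remove, remaining_dict):
--     # Mutates remaining_dict in place (like A) and returns it; single filtering pass.
--     if "" in remaining_dict:
--         remaining_dict.remove("")
--
--     cvals = list(confirmed.values())
--     fvals = list(find.values())
--
--     def keep(g):
--         for p, l in confirmed.items():
--             if g.find(l, p) != p:
--                 return False
--         for p, l in find.items():
--             if g.find(l, p) == p or l not in g:
--                 return False
--         for p, l in remove.items():
--             if l in g and l not in cvals and l not in fvals: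
--                 return False
--         return True
--
--     remaining_dict[:] = [g for g in remaining_dict if keep(g)]
--     return remaining_dict
-- ===== Notes on version B (the rewrite author's own statement) =====
-- stated objective: faster
-- what changed: A's three destructive sweeps (one per constraint dict, each iterating a copy of the word list and calling O(n) list.remove per failing word) are replaced by a single filtering pass with one combined keep-predicate per word, removing the repeated copy() and remove() scans.
import Mathlib
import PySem

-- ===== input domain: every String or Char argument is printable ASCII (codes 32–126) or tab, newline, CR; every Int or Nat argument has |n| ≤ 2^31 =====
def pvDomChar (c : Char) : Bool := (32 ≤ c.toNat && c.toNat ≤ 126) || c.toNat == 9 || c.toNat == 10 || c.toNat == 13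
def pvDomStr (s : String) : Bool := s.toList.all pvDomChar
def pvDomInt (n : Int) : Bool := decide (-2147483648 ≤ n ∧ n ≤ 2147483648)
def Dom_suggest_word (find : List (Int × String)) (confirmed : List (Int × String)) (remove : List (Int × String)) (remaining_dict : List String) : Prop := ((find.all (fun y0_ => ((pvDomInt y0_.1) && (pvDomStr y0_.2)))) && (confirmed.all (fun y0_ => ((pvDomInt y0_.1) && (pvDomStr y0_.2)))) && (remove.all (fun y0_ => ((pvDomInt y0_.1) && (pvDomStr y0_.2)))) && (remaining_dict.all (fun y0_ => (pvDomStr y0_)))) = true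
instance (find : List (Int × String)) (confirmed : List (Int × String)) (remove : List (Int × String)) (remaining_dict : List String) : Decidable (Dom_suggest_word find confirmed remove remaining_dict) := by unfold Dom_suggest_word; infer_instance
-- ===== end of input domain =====

-- B replaces A's three destructive copy-and-remove sweeps over the word list by one
-- filtering pass with a combined keep-predicate; equivalence is about the RETURN value
-- (both Pythons also mutate remaining_dict in place to the same final contents).

-- ===== PORT A =====
-- A's three sweeps: for each constraint item, iterate a copy of the current list and
-- remove (first occurrence of) each failing word from the evolving list.
def suggest_word (find : List (Int × String)) (confirmed : List (Int × String)) (remove : List (Int × String)) (remaining_dict : List String) : List String :=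
  let rd0 := if "" ∈ remaining_dict then (PySem.List.remove? remaining_dict "").getD remaining_dict else remaining_dict
  let rd1 := confirmed.foldl (fun rd pl =>
      rd.foldl (fun acc g =>
        if PySem.Str.findFrom g pl.2 pl.1 none ≠ pl.1 then (PySem.List.remove? acc g).getD acc
        else acc) rd) rd0
  let rd2 := find.foldl (fun rd pl =>
      rd.foldl (fun acc g =>
        if PySem.Str.findFrom g pl.2 pl.1 none = pl.1 then (PySem.List.remove? acc g).getD acc
        else if ¬ PySem.Str.isIn pl.2 g then (PySem.List.remove? acc g).getD acc
        else acc) rd) rd1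
  let rd3 := remove.foldl (fun rd pl =>
      rd.foldl (fun acc g =>
        if PySem.Str.isIn pl.2 g ∧ pl.2 ∉ confirmed.map Prod.snd ∧ pl.2 ∉ find.map Prod.snd then
          (PySem.List.remove? acc g).getD acc
        else acc) rd) rd2
  rd3

-- ===== PORT B =====
-- B's combined predicate: all three constraint checks on one word.
def keepWord (find : List (Int × String)) (confirmed : List (Int × String)) (remove : List (Int × String)) (cvals fvals : List String) (g : String) : Bool :=
  confirmed.all (fun pl => PySem.Str.findFrom g pl.2 pl.1 none == pl.1) &&
  find.all (fun pl => !(PySem.Str.findFrom g pl.2 pl.1 none == pl.1) && PySem.Str.isIn pl.2 g) &&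
  remove.all (fun pl => !(PySem.Str.isIn pl.2 g && !cvals.contains pl.2 && !fvals.contains pl.2))

def suggest_word_alt (find : List (Int × String)) (confirmed : List (Int × String)) (remove : List (Int × String)) (remaining_dict : List String) : List String :=
  let rd := if "" ∈ remaining_dict then (PySem.List.remove? remaining_dict "").getD remaining_dict else remaining_dict
  let cvals := confirmed.map Prod.snd
  let fvals := find.map Prod.snd
  rd.filter (keepWord find confirmed remove cvals fvals)

-- ===== PRECONDITION & SPEC =====
def Spec_suggest_word (find : List (Int × String)) (confirmed : List (Int × String)) (remove : List (Int × String)) (remaining_dict : List String) (out : List String) : Prop := out = suggest_word_alt find confirmed remove remaining_dict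
instance (find : List (Int × String)) (confirmed : List (Int × String)) (remove : List (Int × String)) (remaining_dict : List String) (out : List String) : Decidable (Spec_suggest_word find confirmed remove remaining_dict out) := by unfold Spec_suggest_word; infer_instance

-- ===== CLAIM (what is proved, stated in full; the proofs are below) =====
def Claim_equal_suggest_word : Prop := ∀ (find : List (Int × String)) (confirmed : List (Int × String)) (remove : List (Int × String)) (remaining_dict : List String), Dom_suggest_word find confirmed remove remaining_dict → Spec_suggest_word find confirmed remove remaining_dict (suggest_word find confirmed remove remaining_dict)

-- ===== LEMMAS AND PROOFS =====

-- removing the first occurrence of g from pre ++ g :: xs when g ∉ pre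
theorem remove_append_cons (pre xs : List String) (g : String) (hg : g ∉ pre) :
    PySem.List.remove? (pre ++ g :: xs) g = some (pre ++ xs) := by
  induction pre with
  | nil => simp
  | cons a t ih =>
      have ha : a ≠ g := by intro h; exact hg (by simp [h])
      have ht : g ∉ t := fun h => hg (List.mem_cons_of_mem _ h)
      rw [List.cons_append, PySem.List.remove?_cons_of_ne _ ha, ih ht]
      simp

-- one destructive sweep (iterate a copy, remove failing words) = filter
theorem sweep_eq_filter (q : String → Bool)
    (st : List String → String → List String)
    (hst : ∀ acc g, st acc g = if q g then acc else (PySem.List.remove? acc g).getD acc) :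
    ∀ (xs pre : List String), (∀ x ∈ pre, q x = true) →
      xs.foldl st (pre ++ xs) = pre ++ xs.filter q := by
  intro xs
  induction xs with
  | nil => intro pre _; simp
  | cons g xs ih =>
      intro pre hpre
      by_cases hq : q g = true
      · have : st (pre ++ g :: xs) g = (pre ++ [g]) ++ xs := by
          simp [hst, hq]
        rw [List.foldl_cons, this, ih (pre ++ [g]) (by
          intro x hx
          rcases List.mem_append.mp hx with h | h
          · exact hpre x h
          · simp at h; subst h; exact hq)]
        simp [hq]
      · have hgpre : g ∉ pre := fun h => hq (hpre g h)
        have : st (pre ++ g :: xs) g = pre ++ xs := by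
          simp [hst, hq, remove_append_cons pre xs g hgpre]
        rw [List.foldl_cons, this, ih pre hpre]
        simp [hq]

theorem sweep_eq_filter' (q : String → Bool)
    (st : List String → String → List String)
    (hst : ∀ acc g, st acc g = if q g then acc else (PySem.List.remove? acc g).getD acc)
    (rd : List String) : rd.foldl st rd = rd.filter q :=
  sweep_eq_filter q st hst rd [] (by intro x hx; cases hx)

-- a fold of sweeps over a constraint list = one filter by the all-predicate
theorem fold_sweeps_eq_filter (p : (Int × String) → String → Bool)
    (inner : (Int × String) → List String → String → List String)
    (hinner : ∀ pl acc g, inner pl acc g =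
        if p pl g then acc else (PySem.List.remove? acc g).getD acc) :
    ∀ (cs : List (Int × String)) (rd : List String),
      cs.foldl (fun rd pl => rd.foldl (inner pl) rd) rd
        = rd.filter (fun g => cs.all (fun pl => p pl g)) := by
  intro cs
  induction cs with
  | nil => intro rd; simp
  | cons c cs ih =>
      intro rd
      rw [List.foldl_cons, sweep_eq_filter' (p c) (inner c) (hinner c) rd, ih]
      rw [List.filter_filter]
      apply List.filter_congr
      intro g _
      simp [List.all_cons, Bool.and_comm]

theorem suggest_word_eq_alt (find confirmed remove : List (Int × String)) (rd : List String) :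
    suggest_word find confirmed remove rd = suggest_word_alt find confirmed remove rd := by
  unfold suggest_word suggest_word_alt
  dsimp only
  rw [fold_sweeps_eq_filter (fun pl g => PySem.Str.findFrom g pl.2 pl.1 none == pl.1)
        (fun pl acc g => if PySem.Str.findFrom g pl.2 pl.1 none ≠ pl.1 then (PySem.List.remove? acc g).getD acc else acc)
        (fun pl acc g => by by_cases h : PySem.Chars.findFrom g.toList pl.2.toList pl.1 none = pl.1 <;> simp [h])]
  rw [fold_sweeps_eq_filter (fun pl g => !(PySem.Str.findFrom g pl.2 pl.1 none == pl.1) && PySem.Str.isIn pl.2 g)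
        (fun pl acc g => if PySem.Str.findFrom g pl.2 pl.1 none = pl.1 then (PySem.List.remove? acc g).getD acc
          else if ¬ PySem.Str.isIn pl.2 g then (PySem.List.remove? acc g).getD acc else acc)
        (fun pl acc g => by
          by_cases h : PySem.Chars.findFrom g.toList pl.2.toList pl.1 none = pl.1 <;>
            by_cases h' : PySem.Chars.isIn pl.2.toList g.toList <;> simp [h, h'])]
  rw [fold_sweeps_eq_filter (fun pl g => !(PySem.Str.isIn pl.2 g && !(confirmed.map Prod.snd).contains pl.2 && !(find.map Prod.snd).contains pl.2))
        (fun pl acc g => if PySem.Str.isIn pl.2 g ∧ pl.2 ∉ confirmed.map Prod.snd ∧ pl.2 ∉ find.map Prod.snd then (PySem.List.remove? acc g).getD acc else acc)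
        (fun pl acc g => by
          by_cases ha : PySem.Chars.isIn pl.2.toList g.toList <;>
            by_cases hb : pl.2 ∈ confirmed.map Prod.snd <;>
              by_cases hc : pl.2 ∈ find.map Prod.snd <;>
                simp [ha, hb, hc])]
  rw [List.filter_filter, List.filter_filter]
  apply List.filter_congr
  intro g _
  unfold keepWord
  simp [Bool.and_comm, Bool.and_left_comm, Bool.and_assoc]

-- ===== VERDICT (by name: the statement is the Claim_ definition above) =====
theorem suggest_word_spec : Claim_equal_suggest_word := by
  intro find confirmed remove rd _
  unfold Spec_suggest_word
  exact suggest_word_eq_alt find confirmed remove rd
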